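-- pv_equiv track=rewrite | github.com/junha6316/Algorithm | 0613_bf_1_test.py | solution
-- ===== SOURCE A (Python) =====
-- def solution(answers):
--     temp=[]
--     answer=[0,0,0]
--     tests=[[1,2,3,4,5],  #test[0]
--         [2,1,2,3,2,4,2,5],   #test[1]
--     [3,3,1,1,2,2,4,4,5,5]]  #test[2]
--
--     for i in range(len(tests)):
--         for j in range(len(answers)):  # 전체 답 인덱스
--             if answers[j] == tests[i][j % len(tests[i])]:
--                 answer[i] += 1
--
--     maxi=max(answer)
--     for idx, sp in enumerate(answer):
--         if maxi ==sp:
--            temp.append(idx+1)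
--
--     return temp
-- ===== SOURCE B (Python) =====
-- def solution(answers):
--     # Histogram approach: bucket the answers by (position mod 40, value) once
--     # (40 = lcm of the three pattern lengths), then score each pattern by
--     # summing the buckets its 40-long cycle hits.
--     patterns = ([1, 2, 3, 4, 5],
--                 [2, 1, 2, 3, 2, 4, 2, 5],
--                 [3, 3, 1, 1, 2, 2, 4, 4, 5, 5])
--     hist = {}
--     for j, a in enumerate(answers):
--         k = (j % 40, a)
--         hist[k] = hist.get(k, 0) + 1
--     scores = [sum(hist.get((r, p[r % len(p)]), 0) for r in range(40))
--               for p in patterns]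
--     best = max(scores)
--     return [i for i in (1, 2, 3) if scores[i - 1] == best]
-- ===== Notes on version B (the rewrite author's own statement) =====
-- stated objective: alternative
-- what changed: Instead of scanning answers against each cyclic pattern, B builds a dict histogram keyed by (index mod 40, value) in one pass (40 = lcm of the pattern lengths) and scores each pattern by summing the 40 buckets its cycle hits, then collects the 1-based indices achieving the maximal score.
import Mathlib
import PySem

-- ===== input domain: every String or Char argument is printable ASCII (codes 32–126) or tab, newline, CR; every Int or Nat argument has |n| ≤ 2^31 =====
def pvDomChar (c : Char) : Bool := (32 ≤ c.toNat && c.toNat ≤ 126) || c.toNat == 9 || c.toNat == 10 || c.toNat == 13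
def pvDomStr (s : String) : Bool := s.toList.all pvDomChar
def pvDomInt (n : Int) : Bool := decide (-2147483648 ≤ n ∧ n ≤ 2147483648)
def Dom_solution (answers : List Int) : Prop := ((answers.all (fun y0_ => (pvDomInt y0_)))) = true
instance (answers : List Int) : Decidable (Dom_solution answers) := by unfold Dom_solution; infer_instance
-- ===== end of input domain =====

-- B replaces A's three direct scans against the cyclic patterns by a histogram: one pass
-- buckets the answers by (index mod 40, value) (40 = lcm of the pattern lengths), then each
-- pattern is scored by summing the 40 buckets its cycle hits (objective: alternative).

-- ===== PORT A =====
-- literal transliteration of A: nested loops, a counter LIST `answer` mutated by index,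
-- max over the list, then an append loop over enumerate(answer).
def solution (answers : List Int) : List Int :=
  let tests : List (List Int) := [[1,2,3,4,5],[2,1,2,3,2,4,2,5],[3,3,1,1,2,2,4,4,5,5]]
  let answer : List Int :=
    (PySem.List.pyRange 0 (tests.length : Int) 1).foldl (fun ans i =>
      let ti := PySem.List.pyGetD tests i []
      (PySem.List.pyRange 0 (answers.length : Int) 1).foldl (fun ans j =>
        if PySem.List.pyGetD answers j 0 = PySem.List.pyGetD ti (PySem.Int.mod j (ti.length : Int)) 0 then
          ans.set i.toNat (PySem.List.pyGetD ans i 0 + 1)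
        else ans) ans) [0, 0, 0]
  let maxi := (PySem.List.max? answer (fun x => x)).getD 0   -- `answer` always has 3 elements, so max() never raises
  (PySem.List.enumerate answer 0).foldl (fun temp p =>
    if maxi = p.2 then temp ++ [p.1 + 1] else temp) []

-- ===== PORT B =====
-- literal transliteration of B: build the dict `hist` keyed by (j % 40, value) in one pass,
-- score each pattern by summing 40 lookups, then keep the 1-based pattern indices whose score is maximal.
def solution_alt (answers : List Int) : List Int :=
  let patterns : List (List Int) := [[1,2,3,4,5],[2,1,2,3,2,4,2,5],[3,3,1,1,2,2,4,4,5,5]]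
  let hist : PySem.Dict (Int × Int) Int :=
    (PySem.List.enumerate answers 0).foldl (fun d q =>
      let k := (PySem.Int.mod q.1 40, q.2)
      d.insert k (d.getD k 0 + 1)) PySem.Dict.empty
  let scores : List Int := patterns.map (fun p =>
    ((PySem.List.pyRange 0 40 1).map (fun r =>
      hist.getD (r, PySem.List.pyGetD p (PySem.Int.mod r (p.length : Int)) 0) 0)).sum)
  let best := (PySem.List.max? scores (fun x => x)).getD 0   -- `scores` has 3 elements, so max() never raises
  ([(1 : Int), 2, 3].filter (fun i => decide (PySem.List.pyGetD scores (i - 1) 0 = best)))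

-- ===== PRECONDITION & SPEC =====
def Spec_solution (answers : List Int) (out : List Int) : Prop := out = solution_alt answers
instance (answers : List Int) (out : List Int) : Decidable (Spec_solution answers out) := by unfold Spec_solution; infer_instance

-- ===== CLAIM (what is proved, stated in full; the proofs are below) =====
def Claim_equal_solution : Prop := ∀ (answers : List Int), Dom_solution answers → Spec_solution answers (solution answers)

-- ===== LEMMAS AND PROOFS =====

-- A's inner loop: conditionally bumping the fixed cell i of `ans` over an index list L
-- adds the number of indices satisfying the test to that cell.
theorem pv_set_count (P : Int → Prop) [DecidablePred P] (i : Nat) :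
    ∀ (L : List Int) (ans : List Int), i < ans.length →
      L.foldl (fun ans j => if P j then ans.set i (PySem.List.pyGetD ans (i : Int) 0 + 1) else ans) ans
        = ans.set i (PySem.List.pyGetD ans (i : Int) 0 + (L.countP (fun j => decide (P j)) : Int)) := by
  intro L
  induction L with
  | nil =>
    intro ans h
    simp [List.getElem?_eq_getElem h, List.set_getElem_self]
  | cons j L ih =>
    intro ans h
    by_cases hp : P j
    · simp only [List.foldl_cons, if_pos hp]
      rw [ih _ (by simpa using h)]
      simp [List.getElem?_eq_getElem h, List.getElem?_eq_getElem (show i < (ans.set i _).length by simpa using h),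
        List.getElem_set_self, List.set_set, hp]
      congr 1
      ring
    · simp only [List.foldl_cons, if_neg hp]
      rw [ih _ h]
      simp [hp]

-- the same, phrased with the Int-valued index the port's loop variable carries
theorem pv_set_count' (P : Int → Prop) [DecidablePred P] (i : Int) (hi : 0 ≤ i)
    (L : List Int) (ans : List Int) :
    L.foldl (fun ans j => if P j then ans.set i.toNat (PySem.List.pyGetD ans i 0 + 1) else ans) ans
      = ans.set i.toNat (PySem.List.pyGetD ans i 0 + (L.countP (fun j => decide (P j)) : Int)) := by
  by_cases h : i.toNat < ans.length
  · obtain ⟨n, rfl⟩ := Int.eq_ofNat_of_zero_le hi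
    simpa using pv_set_count P n L ans (by simpa using h)
  · have h1 : ans.length ≤ i.toNat := by omega
    have hfix : ∀ L' : List Int,
        L'.foldl (fun ans j => if P j then ans.set i.toNat (PySem.List.pyGetD ans i 0 + 1) else ans) ans = ans := by
      intro L'
      induction L' with
      | nil => rfl
      | cons j L' ih =>
        rw [List.foldl_cons]
        have hif : (if P j then ans.set i.toNat (PySem.List.pyGetD ans i 0 + 1) else ans) = ans := by
          split <;> simp [List.set_eq_of_length_le h1]
        rw [hif, ih]
    rw [hfix, List.set_eq_of_length_le h1]

-- summing a 0/1 indicator keyed by k over a duplicate-free list R that contains k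
theorem pv_sum_indicator (k : Int) (c : Int → Prop) [DecidablePred c] :
    ∀ (R : List Int), R.Nodup →
      (R.map (fun r => if k = r ∧ c r then (1 : Int) else 0)).sum
        = if k ∈ R ∧ c k then (1 : Int) else 0 := by
  intro R
  induction R with
  | nil => simp
  | cons r R ih =>
    intro hnd
    rw [List.nodup_cons] at hnd
    by_cases hk : k = r
    · subst hk
      have : (R.map (fun r => if k = r ∧ c r then (1 : Int) else 0)).sum = 0 := by
        rw [ih hnd.2]
        simp [hnd.1]
      simp [this]
    · simp only [List.map_cons, List.sum_cons, ih hnd.2]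
      simp [hk]

-- partitioning a count over index list L by the residue r = j % 40 drawn from R
theorem pv_sum_countP (v w : Int → Int) :
    ∀ (L : List Int),
      (((PySem.List.pyRange 0 40 1)).map (fun r =>
          ((L.countP (fun j => decide (PySem.Int.mod j 40 = r ∧ v j = w r)) : Nat) : Int))).sum
        = ((L.countP (fun j => decide (v j = w (PySem.Int.mod j 40))) : Nat) : Int) := by
  intro L
  induction L with
  | nil => simp
  | cons j L ih =>
    simp only [List.countP_cons]
    push_cast
    simp only [decide_eq_true_eq] at *
    rw [show ((PySem.List.pyRange 0 40 1).map (fun r =>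
        (L.countP (fun j => decide (PySem.Int.mod j 40 = r ∧ v j = w r)) : Int)
          + (if (PySem.Int.mod j 40 = r ∧ v j = w r) then (1:Int) else 0))).sum
      = ((PySem.List.pyRange 0 40 1).map (fun r =>
          (L.countP (fun j => decide (PySem.Int.mod j 40 = r ∧ v j = w r)) : Int))).sum
        + ((PySem.List.pyRange 0 40 1).map (fun r =>
          if (PySem.Int.mod j 40 = r ∧ v j = w r) then (1:Int) else 0)).sum from by
        rw [← List.sum_map_add]]
    rw [ih]
    have hnd : (PySem.List.pyRange 0 40 1).Nodup := by decide
    rw [pv_sum_indicator (PySem.Int.mod j 40) (fun r => v j = w r) _ hnd]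
    have h0 : 0 ≤ j % 40 ∧ j % 40 < 40 :=
      ⟨Int.emod_nonneg j (by norm_num), Int.emod_lt_of_pos j (by norm_num)⟩
    simp [PySem.List.mem_pyRange_one, h0]

-- B's score of a pattern p (length dividing 40) equals A's direct count for p
theorem pv_score (answers p : List Int) (hdvd : ((p.length : Int)) ∣ 40) (hpos : 0 < (p.length : Int)) :
    ((PySem.List.pyRange 0 40 1).map (fun r =>
        (PySem.Dict.counter ((PySem.List.pyRange 0 (answers.length : Int) 1).map
            (fun j => (PySem.Int.mod j 40, PySem.List.pyGetD answers j 0)))).getD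
          (r, PySem.List.pyGetD p (PySem.Int.mod r (p.length : Int)) 0) 0)).sum
      = ((PySem.List.pyRange 0 (answers.length : Int) 1).countP
          (fun j => decide (PySem.List.pyGetD answers j 0
            = PySem.List.pyGetD p (PySem.Int.mod j (p.length : Int)) 0)) : Int) := by
  simp only [PySem.Dict.getD_counter, List.count_eq_countP, List.countP_map]
  have hconv : ∀ r : Int,
      ((PySem.List.pyRange 0 (answers.length : Int) 1).countP
        ((fun x => x == (r, PySem.List.pyGetD p (PySem.Int.mod r (p.length : Int)) 0)) ∘
          (fun j => (PySem.Int.mod j 40, PySem.List.pyGetD answers j 0))))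
      = ((PySem.List.pyRange 0 (answers.length : Int) 1).countP
        (fun j => decide (PySem.Int.mod j 40 = r ∧
          PySem.List.pyGetD answers j 0 = PySem.List.pyGetD p (PySem.Int.mod r (p.length : Int)) 0))) := by
    intro r
    apply List.countP_congr
    intro j _
    simp [Function.comp, Prod.ext_iff]
  simp only [hconv]
  rw [pv_sum_countP (fun j => PySem.List.pyGetD answers j 0)
      (fun r => PySem.List.pyGetD p (PySem.Int.mod r (p.length : Int)) 0)]
  congr 1
  apply List.countP_congr
  intro j _
  have : PySem.Int.mod (PySem.Int.mod j 40) (p.length : Int)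
       = PySem.Int.mod j (p.length : Int) := by
    simp only [PySem.Int.mod_eq_emod_of_pos hpos,
      PySem.Int.mod_eq_emod_of_pos (show (0:Int) < 40 by norm_num)]
    exact Int.emod_emod_of_dvd j hdvd
  rw [this]

-- ===== VERDICT (by name: the statement is the Claim_ definition above) =====
theorem solution_spec : Claim_equal_solution := by
  intro answers _
  unfold Spec_solution solution solution_alt
  dsimp only
  -- B's hist loop builds the counter of the (j % 40, value) keys
  have hkey : ((PySem.List.enumerate answers 0).foldl (fun d q =>
        PySem.Dict.insert d (PySem.Int.mod q.1 40, q.2)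
          (PySem.Dict.getD d (PySem.Int.mod q.1 40, q.2) 0 + 1)) PySem.Dict.empty)
      = PySem.Dict.counter ((PySem.List.pyRange 0 (answers.length : Int) 1).map
          (fun j => (PySem.Int.mod j 40, PySem.List.pyGetD answers j 0))) := by
    rw [← PySem.Dict.foldl_insert_getD_add_one_eq_counter, List.foldl_map,
        PySem.List.enumerate_eq_map_pyRange answers 0, List.foldl_map]
    simp only [PySem.List.len]
  rw [hkey]
  simp only [List.map_cons, List.map_nil]
  simp only [pv_score answers [1,2,3,4,5] (by decide) (by decide),
      pv_score answers [2,1,2,3,2,4,2,5] (by decide) (by decide),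
      pv_score answers [3,3,1,1,2,2,4,4,5,5] (by decide) (by decide)]
  -- A's nested loops: each pattern's pass adds its count to its cell
  rw [show PySem.List.pyRange 0 (([[1,2,3,4,5],[2,1,2,3,2,4,2,5],[3,3,1,1,2,2,4,4,5,5]] : List (List Int)).length : Int) 1 = [0,1,2] from by decide]
  simp only [List.foldl_cons, List.foldl_nil]
  simp only [show PySem.List.pyGetD ([[1,2,3,4,5],[2,1,2,3,2,4,2,5],[3,3,1,1,2,2,4,4,5,5]] : List (List Int)) 0 [] = [1,2,3,4,5] from by decide,
    show PySem.List.pyGetD ([[1,2,3,4,5],[2,1,2,3,2,4,2,5],[3,3,1,1,2,2,4,4,5,5]] : List (List Int)) 1 [] = [2,1,2,3,2,4,2,5] from by decide,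
    show PySem.List.pyGetD ([[1,2,3,4,5],[2,1,2,3,2,4,2,5],[3,3,1,1,2,2,4,4,5,5]] : List (List Int)) 2 [] = [3,3,1,1,2,2,4,4,5,5] from by decide]
  rw [pv_set_count' _ 0 (by decide), pv_set_count' _ 1 (by decide), pv_set_count' _ 2 (by decide)]
  norm_num
  generalize hx : ((List.countP (fun j => decide (PySem.List.pyGetD answers j 0 = PySem.List.pyGetD [1,2,3,4,5] (j % 5) 0)) (PySem.List.pyRange 0 (answers.length : Int) 1) : Nat) : Int) = x
  generalize hy : ((List.countP (fun j => decide (PySem.List.pyGetD answers j 0 = PySem.List.pyGetD [2,1,2,3,2,4,2,5] (j % 8) 0)) (PySem.List.pyRange 0 (answers.length : Int) 1) : Nat) : Int) = y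
  generalize hz : ((List.countP (fun j => decide (PySem.List.pyGetD answers j 0 = PySem.List.pyGetD [3,3,1,1,2,2,4,4,5,5] (j % 10) 0)) (PySem.List.pyRange 0 (answers.length : Int) 1) : Nat) : Int) = z
  norm_num [PySem.List.pyGetD, PySem.List.pyGet?, PySem.List.pyIdx?, List.set]
  norm_num [show Int.toNat 2 = 2 from rfl, List.set]
  have hmax : ∀ L : List Int, (PySem.List.max? [x, y, z] fun x => x).getD 0 = max x (max y z) := by
    intro _
    rw [PySem.List.max?_id_cons]
    simp [List.foldl, max_assoc]
  rw [hmax []]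
  set m := max x (max y z) with hm
  by_cases h1 : x = m <;> by_cases h2 : y = m <;> by_cases h3 : z = m <;>
    simp [h1, h2, h3, eq_comm]
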